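-- pv_equiv track=rewrite | github.com/snpanchal/game-ai | tic-tac-toe.py | check_for_tie
-- ===== SOURCE A (Python) =====
-- def check_for_tie(game):
--     filled = True
--     for i in range(len(game)):
--         if game[i] == " ":
--             filled = False
--
--     if filled:
--         if not check_for_win(game, "X") and not check_for_win(game, "O"):
--             return True
--         else:
--             return False
--
-- def check_for_win(game, player):
--     if ((game[0] == player and game[1] == player and game[2] == player) or
--             (game[3] == player and game[4] == player and game[5] == player) or
--             (game[6] == player and game[7] == player and game[8] == player) or
--             (game[0] == player and game[3] == player and game[6] == player) or
--             (game[1] == player and game[4] == player and game[7] == player) or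
--             (game[2] == player and game[5] == player and game[8] == player) or
--             (game[0] == player and game[4] == player and game[8] == player) or
--             (game[2] == player and game[4] == player and game[6] == player)):
--         return True
--     else:
--         return False
-- ===== SOURCE B (Python) =====
-- MAGIC = (2, 7, 6, 9, 5, 1, 4, 3, 8)
--
--
-- def check_for_tie(game):
--     if " " in game:
--         return None
--
--     def wins(player):
--         vals = [MAGIC[i] for i in range(9) if game[i] == player]
--         n = len(vals)
--         for a in range(n):
--             for b in range(a + 1, n):
--                 for c in range(b + 1, n):
--                     if vals[a] + vals[b] + vals[c] == 15:
--                         return True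
--         return False
--
--     return not (wins("X") or wins("O"))
-- ===== Notes on version B (the rewrite author's own statement) =====
-- stated objective: alternative
-- what changed: B replaces A's eight hand-written winning-line clauses by the magic-square method — it maps each player's occupied cells to the 3x3 magic-square values and declares a win iff some three of them sum to 15 (correct because the eight triples of distinct values 1..9 summing to 15 are exactly the magic square's rows, columns and diagonals, i.e. the winning lines) — and replaces the flag-setting blank scan by a membership test.
-- outside the precondition, e.g. on check_for_tie(['X', 'X', 'X']): A returns False, B raises IndexError
import Mathlib
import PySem

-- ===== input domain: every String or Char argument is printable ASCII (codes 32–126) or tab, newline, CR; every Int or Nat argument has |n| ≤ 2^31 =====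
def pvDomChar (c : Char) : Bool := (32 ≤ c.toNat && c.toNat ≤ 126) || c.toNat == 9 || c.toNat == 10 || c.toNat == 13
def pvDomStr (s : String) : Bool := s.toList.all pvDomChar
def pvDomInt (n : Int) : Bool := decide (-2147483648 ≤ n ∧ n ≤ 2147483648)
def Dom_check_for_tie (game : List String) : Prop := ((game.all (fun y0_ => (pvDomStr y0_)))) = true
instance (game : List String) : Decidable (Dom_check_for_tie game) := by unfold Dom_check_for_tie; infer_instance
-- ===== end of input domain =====

-- B detects a win by the magic-square method (three occupied cells win iff their magic values
-- sum to 15) instead of A's eight hand-written line clauses (alternative; same cost).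

-- ===== PORT A =====
-- game[i] in A is only evaluated in range inside Pre_; pyGetD is exact there (out of range = IndexError, excluded by Pre_).
def pvGet (game : List String) (i : Int) : String := PySem.List.pyGetD game i ""

def check_for_win (game : List String) (player : String) : Bool :=
  if (pvGet game 0 == player && pvGet game 1 == player && pvGet game 2 == player) ||
     (pvGet game 3 == player && pvGet game 4 == player && pvGet game 5 == player) ||
     (pvGet game 6 == player && pvGet game 7 == player && pvGet game 8 == player) ||
     (pvGet game 0 == player && pvGet game 3 == player && pvGet game 6 == player) ||
     (pvGet game 1 == player && pvGet game 4 == player && pvGet game 7 == player) ||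
     (pvGet game 2 == player && pvGet game 5 == player && pvGet game 8 == player) ||
     (pvGet game 0 == player && pvGet game 4 == player && pvGet game 8 == player) ||
     (pvGet game 2 == player && pvGet game 4 == player && pvGet game 6 == player) then
    true
  else
    false

def pvFilled (game : List String) : Bool :=
  (PySem.List.pyRange 0 (game.length : Int) 1).foldl
    (fun filled i => if pvGet game i == " " then false else filled) true

def check_for_tie (game : List String) : Option Bool :=
  let filled := pvFilled game
  if filled then
    if !check_for_win game "X" && !check_for_win game "O" then some true else some false
  else
    none

-- ===== PORT B =====
def pvMAGIC : List Int := [2, 7, 6, 9, 5, 1, 4, 3, 8]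

-- vals = [MAGIC[i] for i in range(9) if game[i] == player]; indices are in range inside Pre_.
def pvVals (game : List String) (player : String) : List Int :=
  ((PySem.List.pyRange 0 9 1).filter (fun i => pvGet game i == player)).map
    (fun i => PySem.List.pyGetD pvMAGIC i 0)

-- the three nested for-loops returning True on the first triple summing to 15
def pvWinsMagic (game : List String) (player : String) : Bool :=
  let vals := pvVals game player
  let n : Int := (vals.length : Int)
  (PySem.List.pyRange 0 n 1).any (fun a =>
    (PySem.List.pyRange (a + 1) n 1).any (fun b =>
      (PySem.List.pyRange (b + 1) n 1).any (fun c =>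
        PySem.List.pyGetD vals a 0 + PySem.List.pyGetD vals b 0 + PySem.List.pyGetD vals c 0 == 15)))

def check_for_tie_alt (game : List String) : Option Bool :=
  if game.contains " " then none
  else some (!(pvWinsMagic game "X" || pvWinsMagic game "O"))

-- ===== PRECONDITION & SPEC =====
-- Pre_ excludes blank-free boards shorter than 9 cells, on which A's hand-written win check
-- indexes past the end (IndexError on most of them; on a few, e.g. ["X","X","X"], a clause
-- short-circuits to a return first — there B raises IndexError building its value list).
def Pre_check_for_tie (game : List String) : Prop := " " ∈ game ∨ 9 ≤ game.length
instance (game : List String) : Decidable (Pre_check_for_tie game) := by unfold Pre_check_for_tie; infer_instance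
def pvWitness_check_for_tie : List String := ["X", "O", "X", "X", "O", "O", "O", "X", "X"]

def Spec_check_for_tie (game : List String) (out : Option Bool) : Prop := out = check_for_tie_alt game
instance (game : List String) (out : Option Bool) : Decidable (Spec_check_for_tie game out) := by unfold Spec_check_for_tie; infer_instance

-- ===== CLAIM (what is proved, stated in full; the proofs are below) =====
def Claim_equal_check_for_tie : Prop := ∀ (game : List String), Dom_check_for_tie game → Pre_check_for_tie game → Spec_check_for_tie game (check_for_tie game)

-- ===== LEMMAS AND PROOFS =====

-- A's flag loop over the whole board computes "no blank cell".
theorem pv_flag_foldl (xs : List String) (b : Bool) :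
    xs.foldl (fun f c => if c == " " then false else f) b = (b && !xs.contains " ") := by
  induction xs generalizing b with
  | nil => simp
  | cons x xs ih =>
    simp only [List.foldl_cons, List.contains_cons, ih]
    by_cases h : x = " "
    · subst h; simp
    · cases b <;> simp [h, Ne.symm h]

-- A's filled flag is "the board has no blank cell".
theorem pv_filled_eq (game : List String) : pvFilled game = !game.contains " " := by
  have h := PySem.List.foldl_pyRange_zero_pyGetD' game ""
    (fun f c => if c == " " then false else f) true
  unfold pvFilled pvGet
  exact h.trans ((pv_flag_foldl game true).trans (Bool.true_and _))

-- A's eight-clause win expression equals B's magic-square check: both depend only on the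
-- nine booleans game[i] == player, and the equality is checked on all 512 combinations.
set_option maxHeartbeats 4000000 in
theorem pv_win_eq (game : List String) (p : String) :
    check_for_win game p = pvWinsMagic game p := by
  have h9 : PySem.List.pyRange 0 9 1 = [0, 1, 2, 3, 4, 5, 6, 7, 8] := by decide
  unfold check_for_win pvWinsMagic pvVals
  rw [h9]
  simp only [List.filter_cons, List.filter_nil]
  generalize (pvGet game 0 == p) = b0
  generalize (pvGet game 1 == p) = b1
  generalize (pvGet game 2 == p) = b2
  generalize (pvGet game 3 == p) = b3
  generalize (pvGet game 4 == p) = b4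
  generalize (pvGet game 5 == p) = b5
  generalize (pvGet game 6 == p) = b6
  generalize (pvGet game 7 == p) = b7
  generalize (pvGet game 8 == p) = b8
  revert b0 b1 b2 b3 b4 b5 b6 b7 b8
  decide

-- ===== VERDICT (by name: the statement is the Claim_ definition above) =====
theorem check_for_tie_spec : Claim_equal_check_for_tie := by
  intro game _ _
  unfold Spec_check_for_tie check_for_tie check_for_tie_alt
  rw [pv_filled_eq]
  by_cases h : " " ∈ game
  · simp [h]
  · simp only [List.contains_eq_mem, h, decide_false, Bool.not_false, Bool.false_eq_true,
      if_false, pv_win_eq]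
    cases pvWinsMagic game "X" <;> cases pvWinsMagic game "O" <;> rfl
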